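-- pv_equiv track=rewrite | github.com/jamestkpoon/aoc2020 | d10.py | cumulative_sum_down_tree_with_numerical_keys
-- ===== SOURCE A (Python) =====
-- def cumulative_sum_down_tree_with_numerical_keys(dicto):
--     out_ = {}
--     desc_keys_ = sorted(dicto.keys())[::-1]
--     out_[desc_keys_[0]] = 1
--     for desc_key in desc_keys_[1:]:
--         out_[desc_key] = 0
--         for k in dicto[desc_key].keys():
--             out_[desc_key] += out_[k]
--
--     return out_
-- ===== SOURCE B (Python) =====
-- def cumulative_sum_down_tree_with_numerical_keys(dicto):
--     desc_keys = sorted(dicto.keys(), reverse=True)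
--     top = desc_keys[0]
--     memo = {}
--
--     def value(k):
--         if k == top:
--             return 1
--         if k in memo:
--             return memo[k]
--         s = sum(value(c) for c in dicto[k].keys())
--         memo[k] = s
--         return s
--
--     return {k: value(k) for k in desc_keys}
-- ===== Notes on version B (the rewrite author's own statement) =====
-- stated objective: alternative
-- what changed: Replaces the bottom-up iterative DP that fills out_ while scanning the descending sorted keys with a top-down memoized recursion value(k) (1 at the maximum key, else the sum of the children's values), called for each key.
-- outside the precondition, e.g. on cumulative_sum_down_tree_with_numerical_keys({0: {0: 0}, 1: {}}): A returns {0: 0, 1: 1}, B raises RecursionError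
import Mathlib
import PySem

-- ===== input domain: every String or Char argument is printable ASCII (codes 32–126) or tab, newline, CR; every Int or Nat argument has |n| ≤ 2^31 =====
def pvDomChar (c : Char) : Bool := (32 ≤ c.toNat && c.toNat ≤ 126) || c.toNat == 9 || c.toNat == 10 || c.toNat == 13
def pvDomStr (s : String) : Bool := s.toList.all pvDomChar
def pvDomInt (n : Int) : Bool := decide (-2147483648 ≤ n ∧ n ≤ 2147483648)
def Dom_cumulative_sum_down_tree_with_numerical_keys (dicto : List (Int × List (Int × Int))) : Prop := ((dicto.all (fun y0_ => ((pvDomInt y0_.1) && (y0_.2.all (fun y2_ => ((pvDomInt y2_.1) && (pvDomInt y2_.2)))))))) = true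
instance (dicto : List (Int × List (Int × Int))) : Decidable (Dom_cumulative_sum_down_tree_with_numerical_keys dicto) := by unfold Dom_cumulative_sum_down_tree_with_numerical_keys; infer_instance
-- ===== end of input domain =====

-- B replaces A's bottom-up iterative DP over the descending sorted keys by a top-down memoized
-- recursion (alternative decomposition, same cost). Equality of the return value is proved on Pre_.

-- ===== PORT A =====
-- A's inner loop 'out_[desc_key] = 0; for k in ...: out_[desc_key] += out_[k]' is ported as a fold
-- accumulating the sum before the single insert; exact under Pre_ (children differ from their key
-- and are present in out_, so the getD 0 guard is never the value used).
def cumulative_sum_down_tree_with_numerical_keys (dicto : List (Int × List (Int × Int))) : List (Int × Int) :=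
  let descKeys := (PySem.List.sorted (dicto.map Prod.fst) (fun k => k) false).reverse  -- sorted(dicto.keys())[::-1]
  match descKeys with
  | [] => []  -- Python raises IndexError on desc_keys_[0]; excluded by Pre_
  | top :: rest =>
    (rest.foldl (fun out k =>
        PySem.Dict.insert out k
          ((((PySem.Dict.get? (PySem.Dict.mk dicto) k).getD []).map Prod.fst).foldl
            (fun acc c => acc + PySem.Dict.getD out c 0) 0))
      (PySem.Dict.insert PySem.Dict.empty top 1)).items

-- ===== PORT B =====
-- value(k): 1 at the top key, else memo hit, else sum of the children's values, memoized.
-- fuel is a totality guard only (under Pre_ every child resolves as top or a memo hit).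
def pvBValue (dicto : List (Int × List (Int × Int))) (top : Int) :
    Nat → PySem.Dict Int Int → Int → Int × PySem.Dict Int Int
  | fuel, memo, k =>
    if k = top then (1, memo)
    else
      match PySem.Dict.get? memo k with
      | some v => (v, memo)
      | none =>
        match fuel with
        | 0 => (0, memo)  -- unreachable under Pre_
        | Nat.succ f =>
          let p := (((PySem.Dict.get? (PySem.Dict.mk dicto) k).getD []).map Prod.fst).foldl
            (fun (p : Int × PySem.Dict Int Int) c =>
              let r := pvBValue dicto top f p.2 c
              (p.1 + r.1, r.2)) (0, memo)
          (p.1, PySem.Dict.insert p.2 k p.1)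

def cumulative_sum_down_tree_with_numerical_keys_alt (dicto : List (Int × List (Int × Int))) : List (Int × Int) :=
  let descKeys := PySem.List.sorted (dicto.map Prod.fst) (fun k => k) true  -- sorted(dicto.keys(), reverse=True)
  match descKeys with
  | [] => []  -- Python raises IndexError on desc_keys[0]; excluded by Pre_
  | top :: _ =>
    (descKeys.foldl (fun (st : PySem.Dict Int Int × PySem.Dict Int Int) k =>
        let r := pvBValue dicto top dicto.length st.2 k
        (PySem.Dict.insert st.1 k r.1, r.2)) (PySem.Dict.empty, PySem.Dict.empty)).1.items

-- ===== PRECONDITION & SPEC =====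
-- Pre_ excludes: the empty dict (A raises IndexError); assoc lists in which the outer or a child
-- key list has duplicates (they do not represent a Python dict uniquely); and children that are not
-- strictly-greater keys of the dict — there A raises KeyError, except a self-loop child equal to
-- its own key, where A returns an accidental partial sum and B's recursion does not terminate.
def Pre_cumulative_sum_down_tree_with_numerical_keys (dicto : List (Int × List (Int × Int))) : Prop :=
  dicto ≠ [] ∧ (dicto.map Prod.fst).Nodup ∧ (∀ p ∈ dicto, (p.2.map Prod.fst).Nodup) ∧
    ∀ p ∈ dicto, (∃ q ∈ dicto, q.1 > p.1) → ∀ c ∈ p.2, c.1 > p.1 ∧ c.1 ∈ dicto.map Prod.fst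
instance (dicto : List (Int × List (Int × Int))) : Decidable (Pre_cumulative_sum_down_tree_with_numerical_keys dicto) := by unfold Pre_cumulative_sum_down_tree_with_numerical_keys; infer_instance

def pvWitness_cumulative_sum_down_tree_with_numerical_keys : (List (Int × List (Int × Int))) :=
  [(1, [(3, 0)]), (3, []), (2, [(3, 5)])]

def Spec_cumulative_sum_down_tree_with_numerical_keys (dicto : List (Int × List (Int × Int))) (out : List (Int × Int)) : Prop := out = cumulative_sum_down_tree_with_numerical_keys_alt dicto
instance (dicto : List (Int × List (Int × Int))) (out : List (Int × Int)) : Decidable (Spec_cumulative_sum_down_tree_with_numerical_keys dicto out) := by unfold Spec_cumulative_sum_down_tree_with_numerical_keys; infer_instance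

-- ===== CLAIM (what is proved, stated in full; the proofs are below) =====
def Claim_equal_cumulative_sum_down_tree_with_numerical_keys : Prop := ∀ (dicto : List (Int × List (Int × Int))), Dom_cumulative_sum_down_tree_with_numerical_keys dicto → Pre_cumulative_sum_down_tree_with_numerical_keys dicto → Spec_cumulative_sum_down_tree_with_numerical_keys dicto (cumulative_sum_down_tree_with_numerical_keys dicto)

-- ===== LEMMAS AND PROOFS =====

-- evaluation lemmas for one call of B's value(k)
lemma pv_bv_top (dicto : List (Int × List (Int × Int))) (top : Int) (f : Nat)
    (m : PySem.Dict Int Int) : pvBValue dicto top f m top = (1, m) := by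
  rw [pvBValue.eq_def]; simp

lemma pv_bv_hit (dicto : List (Int × List (Int × Int))) (top : Int) (f : Nat)
    (m : PySem.Dict Int Int) (k : Int) (v : Int) (h1 : k ≠ top)
    (h2 : PySem.Dict.get? m k = some v) : pvBValue dicto top f m k = (v, m) := by
  rw [pvBValue.eq_def]; simp [h1, h2]

lemma pv_bv_miss (dicto : List (Int × List (Int × Int))) (top : Int) (f : Nat)
    (m : PySem.Dict Int Int) (k : Int) (h1 : k ≠ top)
    (h2 : PySem.Dict.get? m k = none)
    (P : Int × PySem.Dict Int Int)
    (hP : P = (((PySem.Dict.get? (PySem.Dict.mk dicto) k).getD []).map Prod.fst).foldl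
      (fun (p : Int × PySem.Dict Int Int) c =>
        (p.1 + (pvBValue dicto top f p.2 c).1, (pvBValue dicto top f p.2 c).2)) (0, m)) :
    pvBValue dicto top (Nat.succ f) m k = (P.1, PySem.Dict.insert P.2 k P.1) := by
  subst hP
  rw [pvBValue.eq_def]; simp [h1, h2]

-- lookups in A's out dict (top,1) :: memo
lemma pv_getD_top (top : Int) (l : List (Int × Int)) :
    PySem.Dict.getD (PySem.Dict.mk ((top, 1) :: l)) top 0 = 1 := by
  rw [PySem.Dict.getD_eq_get?_getD, PySem.Dict.get?_mk_cons]; simp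

lemma pv_getD_ne (top c : Int) (m : PySem.Dict Int Int) (h : c ≠ top) :
    PySem.Dict.getD (PySem.Dict.mk ((top, 1) :: m.items)) c 0 = PySem.Dict.getD m c 0 := by
  rw [PySem.Dict.getD_eq_get?_getD, PySem.Dict.get?_mk_cons]
  have hb : (top == c) = false := by simp [Ne.symm h]
  rw [hb]
  simp only [Bool.false_eq_true, if_false]
  have hm : (PySem.Dict.mk (PySem.Dict.items m)) = m := rfl
  rw [hm, PySem.Dict.getD_eq_get?_getD]

-- One pass of B's inner sum over children that are the top key or memo hits: it adds exactly
-- the numbers A reads off its out_ dict ((top,1) in front of the memo) and leaves memo untouched.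
lemma pv_inner (dicto : List (Int × List (Int × Int))) (top : Int) (f : Nat)
    (cs : List Int) :
    ∀ (acc : Int) (m : PySem.Dict Int Int),
    (∀ c ∈ cs, c = top ∨ (PySem.Dict.get? m c).isSome) →
    cs.foldl (fun (p : Int × PySem.Dict Int Int) c =>
        (p.1 + (pvBValue dicto top f p.2 c).1, (pvBValue dicto top f p.2 c).2)) (acc, m)
      = (cs.foldl (fun acc c =>
          acc + PySem.Dict.getD (PySem.Dict.mk ((top, 1) :: m.items)) c 0) acc, m) := by
  induction cs with
  | nil => intro acc m _; rfl
  | cons c cs ih =>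
    intro acc m h
    simp only [List.foldl_cons]
    have hc := h c (by simp)
    rcases eq_or_ne c top with rfl | hct
    · rw [pv_bv_top, pv_getD_top, ih _ _ (fun c hc => h c (by simp [hc]))]
    · rcases hc with hc | hc
      · exact absurd hc hct
      · obtain ⟨v, hv⟩ := Option.isSome_iff_exists.mp hc
        rw [pv_bv_hit dicto top f m c v hct hv, pv_getD_ne top c m hct,
          ih _ _ (fun c hc => h c (by simp [hc]))]
        congr 2
        rw [PySem.Dict.getD_eq_get?_getD, hv]
        rfl

-- The two folds advance in lock step: processing rem from A's out = (top,1) :: memo and from B's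
-- (outD, memo) appends the SAME pair list Δ to memo, to outD and (behind (top,1)) to A's out.
lemma pv_loop (dicto : List (Int × List (Int × Int))) (top : Int) (fl : Nat) (hfl : fl ≠ 0) :
    ∀ (rem : List Int) (memo outD : PySem.Dict Int Int),
    (∀ k ∈ rem, k ≠ top) →
    (∀ k ∈ rem, PySem.Dict.get? memo k = none) →
    (∀ k ∈ rem, PySem.Dict.get? outD k = none) →
    rem.Pairwise (· > ·) →
    (∀ k ∈ rem, ∀ c ∈ ((PySem.Dict.get? (PySem.Dict.mk dicto) k).getD []).map Prod.fst,
        c > k ∧ (c = top ∨ (PySem.Dict.get? memo c).isSome ∨ c ∈ rem)) →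
    ∃ Δ : List (Int × Int),
      ((rem.foldl (fun (st : PySem.Dict Int Int × PySem.Dict Int Int) k =>
          (PySem.Dict.insert st.1 k (pvBValue dicto top fl st.2 k).1,
            (pvBValue dicto top fl st.2 k).2)) (outD, memo)).1).items = outD.items ++ Δ ∧
      ((rem.foldl (fun (st : PySem.Dict Int Int × PySem.Dict Int Int) k =>
          (PySem.Dict.insert st.1 k (pvBValue dicto top fl st.2 k).1,
            (pvBValue dicto top fl st.2 k).2)) (outD, memo)).2).items = memo.items ++ Δ ∧
      (rem.foldl (fun out k =>
          PySem.Dict.insert out k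
            ((((PySem.Dict.get? (PySem.Dict.mk dicto) k).getD []).map Prod.fst).foldl
              (fun acc c => acc + PySem.Dict.getD out c 0) 0))
        (PySem.Dict.mk ((top, 1) :: memo.items))).items = (top, 1) :: (memo.items ++ Δ) := by
  obtain ⟨f, rfl⟩ := Nat.exists_eq_succ_of_ne_zero hfl
  intro rem
  induction rem with
  | nil => intro memo outD _ _ _ _ _; exact ⟨[], by simp⟩
  | cons k rem ih =>
    intro memo outD h1 h2 h2' h3 h4
    have hktop : k ≠ top := h1 k (by simp)
    have hmemo : PySem.Dict.get? memo k = none := h2 k (by simp)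
    have houtD : PySem.Dict.get? outD k = none := h2' k (by simp)
    have hkgt : ∀ k' ∈ rem, k > k' := (List.pairwise_cons.mp h3).1
    have hres : ∀ c ∈ ((PySem.Dict.get? (PySem.Dict.mk dicto) k).getD []).map Prod.fst,
        c = top ∨ (PySem.Dict.get? memo c).isSome := by
      intro c hc
      obtain ⟨hgt, hd⟩ := h4 k (by simp) c hc
      rcases hd with hd | hd | hd
      · exact Or.inl hd
      · exact Or.inr hd
      · rcases List.mem_cons.mp hd with rfl | hd
        · exact absurd hgt (lt_irrefl _)
        · exact absurd hgt (not_lt.mpr (le_of_lt (hkgt c hd)))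
    simp only [List.foldl_cons]
    rw [pv_bv_miss dicto top f memo k hktop hmemo _ rfl,
      pv_inner dicto top f _ 0 memo hres]
    set S : Int := (((PySem.Dict.get? (PySem.Dict.mk dicto) k).getD []).map Prod.fst).foldl
        (fun acc c => acc + PySem.Dict.getD (PySem.Dict.mk ((top, 1) :: memo.items)) c 0) 0 with hS
    have hmemoc : PySem.Dict.contains memo k = false := by
      rw [PySem.Dict.contains_eq_isSome_get?, hmemo]; rfl
    have houtc : PySem.Dict.contains outD k = false := by
      rw [PySem.Dict.contains_eq_isSome_get?, houtD]; rfl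
    have hmitems : (PySem.Dict.insert memo k S).items = memo.items ++ [(k, S)] :=
      PySem.Dict.items_insert_of_not_contains _ _ hmemoc
    have hoitems : (PySem.Dict.insert outD k S).items = outD.items ++ [(k, S)] :=
      PySem.Dict.items_insert_of_not_contains _ _ houtc
    have hAcontains : PySem.Dict.contains (PySem.Dict.mk ((top, 1) :: memo.items)) k = false := by
      rw [PySem.Dict.contains_eq_isSome_get?, PySem.Dict.get?_mk_cons]
      have hb : (top == k) = false := by simp [Ne.symm hktop]
      rw [hb]
      simp only [Bool.false_eq_true, if_false]
      have hm : (PySem.Dict.mk (PySem.Dict.items memo)) = memo := rfl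
      rw [hm, hmemo]; rfl
    have hAstate : PySem.Dict.insert (PySem.Dict.mk ((top, 1) :: memo.items)) k S
        = PySem.Dict.mk ((top, 1) :: (PySem.Dict.insert memo k S).items) := by
      apply PySem.Dict.ext
      rw [PySem.Dict.items_insert_of_not_contains _ _ hAcontains, hmitems]
      rfl
    rw [hAstate]
    have h1' : ∀ k' ∈ rem, k' ≠ top := fun k' hk' => h1 k' (by simp [hk'])
    have hne : ∀ k' ∈ rem, k' ≠ k := fun k' hk' => ne_of_lt (hkgt k' hk')
    have h2n : ∀ k' ∈ rem, PySem.Dict.get? (PySem.Dict.insert memo k S) k' = none := by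
      intro k' hk'
      rw [PySem.Dict.get?_insert_of_ne _ _ (hne k' hk')]
      exact h2 k' (by simp [hk'])
    have h2n' : ∀ k' ∈ rem, PySem.Dict.get? (PySem.Dict.insert outD k S) k' = none := by
      intro k' hk'
      rw [PySem.Dict.get?_insert_of_ne _ _ (hne k' hk')]
      exact h2' k' (by simp [hk'])
    have h3' : rem.Pairwise (· > ·) := (List.pairwise_cons.mp h3).2
    have h4' : ∀ k' ∈ rem, ∀ c ∈ ((PySem.Dict.get? (PySem.Dict.mk dicto) k').getD []).map Prod.fst,
        c > k' ∧ (c = top ∨ (PySem.Dict.get? (PySem.Dict.insert memo k S) c).isSome ∨ c ∈ rem) := by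
      intro k' hk' c hc
      obtain ⟨hgt, hd⟩ := h4 k' (by simp [hk']) c hc
      refine ⟨hgt, ?_⟩
      rcases hd with hd | hd | hd
      · exact Or.inl hd
      · refine Or.inr (Or.inl ?_)
        rcases eq_or_ne c k with rfl | hck
        · simp [PySem.Dict.get?_insert_self]
        · rw [PySem.Dict.get?_insert_of_ne _ _ hck]; exact hd
      · rcases List.mem_cons.mp hd with rfl | hd
        · exact Or.inr (Or.inl (by simp [PySem.Dict.get?_insert_self]))
        · exact Or.inr (Or.inr hd)
    obtain ⟨Δ, hB1, hB2, hA⟩ := ih (PySem.Dict.insert memo k S) (PySem.Dict.insert outD k S)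
      h1' h2n h2n' h3' h4'
    refine ⟨(k, S) :: Δ, ?_, ?_, ?_⟩
    · rw [hB1, hoitems]; simp
    · rw [hB2, hmitems]; simp
    · rw [hA, hmitems]; simp

-- ===== VERDICT (by name: the statement is the Claim_ definition above) =====
theorem cumulative_sum_down_tree_with_numerical_keys_spec : Claim_equal_cumulative_sum_down_tree_with_numerical_keys := by
  intro dicto _ hpre
  obtain ⟨hne, hnodup, _hcnodup, hch⟩ := hpre
  unfold Spec_cumulative_sum_down_tree_with_numerical_keys
  have hperm : (PySem.List.sorted (dicto.map Prod.fst) (fun k => k) false).Perm (dicto.map Prod.fst) :=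
    PySem.List.sorted_perm _ _ _
  have hascnodup : (PySem.List.sorted (dicto.map Prod.fst) (fun k => k) false).Nodup :=
    hperm.nodup_iff.mpr hnodup
  have hasc_le : (PySem.List.sorted (dicto.map Prod.fst) (fun k => k) false).Pairwise (· ≤ ·) :=
    PySem.List.sorted_pairwise _ (fun k => k)
  have hasc_lt : (PySem.List.sorted (dicto.map Prod.fst) (fun k => k) false).Pairwise (· < ·) :=
    (hasc_le.and hascnodup).imp (fun h => lt_of_le_of_ne h.1 h.2)
  have hdesc_gt : (PySem.List.sorted (dicto.map Prod.fst) (fun k => k) false).reverse.Pairwise (· > ·) := by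
    rw [List.pairwise_reverse]; exact hasc_lt
  have hdescperm : (PySem.List.sorted (dicto.map Prod.fst) (fun k => k) false).reverse.Perm (dicto.map Prod.fst) :=
    (List.reverse_perm _).trans hperm
  have hdescnodup : (PySem.List.sorted (dicto.map Prod.fst) (fun k => k) false).reverse.Nodup :=
    hdescperm.nodup_iff.mpr hnodup
  have hsortedtrue : PySem.List.sorted (dicto.map Prod.fst) (fun k => k) true
      = (PySem.List.sorted (dicto.map Prod.fst) (fun k => k) false).reverse :=
    PySem.List.sorted_rev_eq_of_perm_of_pairwise_gt _ _ _ hdescperm hdesc_gt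
  have hdescne : (PySem.List.sorted (dicto.map Prod.fst) (fun k => k) false).reverse ≠ [] := by
    intro h
    rw [h] at hdescperm
    exact hne (by simpa using hdescperm.symm.eq_nil)
  obtain ⟨top, rest, hd⟩ : ∃ t r,
      (PySem.List.sorted (dicto.map Prod.fst) (fun k => k) false).reverse = t :: r := by
    cases h : (PySem.List.sorted (dicto.map Prod.fst) (fun k => k) false).reverse with
    | nil => exact absurd h hdescne
    | cons t r => exact ⟨t, r, rfl⟩
  have hlen : dicto.length ≠ 0 := by simpa [List.length_eq_zero_iff] using hne
  -- facts about top and rest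
  rw [hd] at hdesc_gt hdescperm hdescnodup
  have htopnotin : top ∉ rest := (List.nodup_cons.mp hdescnodup).1
  have hrestnodup : rest.Nodup := (List.nodup_cons.mp hdescnodup).2
  have htopgt : ∀ k ∈ rest, top > k := (List.pairwise_cons.mp hdesc_gt).1
  have hrest_gt : rest.Pairwise (· > ·) := (List.pairwise_cons.mp hdesc_gt).2
  have htopmem : top ∈ dicto.map Prod.fst := hdescperm.mem_iff.mp (by simp)
  obtain ⟨q, hq, hq1⟩ := List.mem_map.mp htopmem
  -- unfold the two ports
  unfold cumulative_sum_down_tree_with_numerical_keys cumulative_sum_down_tree_with_numerical_keys_alt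
  rw [hsortedtrue, hd]
  simp only [List.foldl_cons]
  rw [pv_bv_top]
  have hinit : PySem.Dict.insert (PySem.Dict.empty : PySem.Dict Int Int) top 1
      = PySem.Dict.mk [(top, (1 : Int))] := rfl
  obtain ⟨Δ, hB1, _hB2, hA⟩ := pv_loop dicto top dicto.length hlen rest
    PySem.Dict.empty (PySem.Dict.insert PySem.Dict.empty top 1)
    (fun k hk => ne_of_mem_of_not_mem hk htopnotin)
    (fun k _ => rfl)
    (fun k hk => by
      rw [PySem.Dict.get?_insert_of_ne _ _ (ne_of_mem_of_not_mem hk htopnotin)]; rfl)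
    hrest_gt
    (by
      intro k hk c hc
      cases hgk : PySem.Dict.get? (PySem.Dict.mk dicto) k with
      | none => rw [hgk] at hc; simp at hc
      | some cl =>
        rw [hgk] at hc
        simp only [Option.getD_some] at hc
        obtain ⟨cp, hcp, rfl⟩ := List.mem_map.mp hc
        have hmem : (k, cl) ∈ dicto := by
          have := (PySem.Dict.get?_eq_some_iff_mem_items (PySem.Dict.mk dicto) k cl ?hnd).mp hgk
          · exact this
          · simpa [PySem.Dict.keys] using hnodup
        have hcond := hch (k, cl) hmem ⟨q, hq, by rw [hq1]; exact htopgt k hk⟩ cp hcp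
        refine ⟨hcond.1, ?_⟩
        have : cp.1 ∈ top :: rest := hdescperm.mem_iff.mpr hcond.2
        rcases List.mem_cons.mp this with h | h
        · exact Or.inl h
        · exact Or.inr (Or.inr h))
  rw [hinit] at hB1 ⊢
  have hinit2 : (PySem.Dict.mk [(top, (1 : Int))])
      = PySem.Dict.mk ((top, (1 : Int)) :: (PySem.Dict.empty : PySem.Dict Int Int).items) := rfl
  rw [hinit2] at hB1 ⊢
  rw [hA, hB1]
  simp
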